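-- pv_equiv track=rewrite | github.com/MustelaErminea/python_beginner_course | cource/p4_functions/duplet.py | calc_dice_scores
-- ===== SOURCE A (Python) =====
-- from typing import Tuple, List
--
-- def calc_dice_scores(dices: List[Tuple[int, int]]) -> int:
--     amount: int = 0
--
--     for dice in dices:
--         if dice[0] == dice[1]:
--             return 0
--         else:
--             amount += dice[0] + dice[1]
--
--     return amount
-- ===== SOURCE B (Python) =====
-- def calc_dice_scores(dices):
--     # Arithmetic zero-detection: the product of (a - b) over all pairs is zero
--     # exactly when some pair is a doublet; no equality test, no early return.
--     total = 0
--     prod = 1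
--     for a, b in dices:
--         total += a + b
--         prod *= a - b
--     return total if prod else 0
-- ===== Notes on version B (the rewrite author's own statement) =====
-- stated objective: alternative
-- what changed: Replaces the early-returning loop with comparisons by a single exhaustive pass that accumulates the sum and the product of differences (a-b); a doublet is detected arithmetically because it zeroes that product, and the final result is total if prod else 0.
import Mathlib
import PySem

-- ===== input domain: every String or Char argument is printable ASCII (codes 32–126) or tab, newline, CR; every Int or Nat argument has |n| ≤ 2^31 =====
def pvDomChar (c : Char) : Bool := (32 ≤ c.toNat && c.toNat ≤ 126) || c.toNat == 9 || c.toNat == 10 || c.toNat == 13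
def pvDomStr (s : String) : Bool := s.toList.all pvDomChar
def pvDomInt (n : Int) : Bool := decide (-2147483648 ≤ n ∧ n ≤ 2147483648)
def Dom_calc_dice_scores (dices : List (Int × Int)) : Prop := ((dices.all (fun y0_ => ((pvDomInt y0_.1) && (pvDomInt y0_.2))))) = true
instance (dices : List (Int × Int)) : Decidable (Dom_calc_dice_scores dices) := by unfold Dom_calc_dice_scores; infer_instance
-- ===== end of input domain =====

-- ===== PORT A =====
-- One honest line: B replaces A's early-returning comparison loop by one exhaustive pass
-- accumulating the sum and the product of differences, detecting doublets arithmetically.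
def calc_dice_scores (dices : List (Int × Int)) : Int :=
  -- for dice in dices: if dice[0] == dice[1]: return 0 else: amount += dice[0] + dice[1]
  go dices 0
where go : List (Int × Int) → Int → Int
  | [], amount => amount
  | d :: rest, amount =>
    if d.1 = d.2 then 0 else go rest (amount + (d.1 + d.2))

-- ===== PORT B =====
def calc_dice_scores_alt (dices : List (Int × Int)) : Int :=
  -- total += a + b; prod *= a - b; return total if prod else 0
  let st := dices.foldl (fun st d => (st.1 + (d.1 + d.2), st.2 * (d.1 - d.2))) (0, 1)
  if st.2 = 0 then 0 else st.1

-- ===== PRECONDITION & SPEC =====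
def Spec_calc_dice_scores (dices : List (Int × Int)) (out : Int) : Prop := out = calc_dice_scores_alt dices
instance (dices : List (Int × Int)) (out : Int) : Decidable (Spec_calc_dice_scores dices out) := by unfold Spec_calc_dice_scores; infer_instance

-- ===== CLAIM (what is proved, stated in full; the proofs are below) =====
def Claim_equal_calc_dice_scores : Prop := ∀ (dices : List (Int × Int)), Dom_calc_dice_scores dices → Spec_calc_dice_scores dices (calc_dice_scores dices)

-- ===== LEMMAS AND PROOFS =====

lemma go_eq (dices : List (Int × Int)) (amount : Int) :
    calc_dice_scores.go dices amount =
      if dices.any (fun d => d.1 == d.2) then 0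
      else amount + (dices.map (fun d => d.1 + d.2)).sum := by
  induction dices generalizing amount with
  | nil => simp [calc_dice_scores.go]
  | cons d rest ih =>
    simp only [calc_dice_scores.go, List.any_cons, List.map_cons, List.sum_cons]
    by_cases h : d.1 = d.2
    · simp [h]
    · have hb : (d.1 == d.2) = false := by simp [h]
      simp only [h, if_false, ih, hb, Bool.false_or]
      split <;> [rfl; ring]

lemma foldl_pair (dices : List (Int × Int)) (t p : Int) :
    dices.foldl (fun st d => (st.1 + (d.1 + d.2), st.2 * (d.1 - d.2))) (t, p) =
      (t + (dices.map (fun d => d.1 + d.2)).sum,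
       p * (dices.map (fun d => d.1 - d.2)).prod) := by
  induction dices generalizing t p with
  | nil => simp
  | cons d rest ih =>
    simp only [List.foldl_cons, List.map_cons, List.sum_cons, List.prod_cons, ih]
    refine Prod.ext ?_ ?_ <;> simp <;> ring

lemma prod_zero_iff (dices : List (Int × Int)) :
    (dices.map (fun d => d.1 - d.2)).prod = 0 ↔ dices.any (fun d => d.1 == d.2) := by
  rw [List.prod_eq_zero_iff]
  simp [sub_eq_zero, List.any_eq_true]

-- ===== VERDICT (by name: the statement is the Claim_ definition above) =====
theorem calc_dice_scores_spec : Claim_equal_calc_dice_scores := by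
  intro dices _
  unfold Spec_calc_dice_scores calc_dice_scores calc_dice_scores_alt
  rw [go_eq, foldl_pair]
  by_cases h : (dices.map (fun d => d.1 - d.2)).prod = 0
  · have := (prod_zero_iff dices).mp h
    simp [h, this]
  · have hb : dices.any (fun d => d.1 == d.2) = false := by
      rw [← Bool.not_eq_true, ← prod_zero_iff]; exact h
    simp [h, hb]
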